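-- pv_equiv track=rewrite | github.com/andrewbrodriguez/cs50_Final_Project | backend/main.py | ingest
-- ===== SOURCE A (Python) =====
-- def ingest(text):
--     counter = 0
--     block = ""
--     blocks = []
--     for c in text:
--         block += c
--         if c == "." or c == "!" or c == "?":
--             counter += 1
--         if counter > 10:
--             blocks.append(block)
--             block = ""
--             counter = 0
--     return blocks
-- ===== SOURCE B (Python) =====
-- def ingest(text):
--     # Index-based rewrite: locate all sentence-ending marks once, then cut the
--     # text at every 11th mark with slices; the trailing remainder is dropped.
--     punct = [i for i, c in enumerate(text) if c in ".!?"]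
--     blocks = []
--     start = 0
--     while len(punct) >= 11:
--         p = punct[10]
--         blocks.append(text[start:p + 1])
--         start = p + 1
--         punct = punct[11:]
--     return blocks
-- ===== Notes on version B (the rewrite author's own statement) =====
-- stated objective: simpler
-- what changed: A accumulates a growing block string and a punctuation counter character by character; B builds the list of sentence-ending mark positions once and then cuts the text with slices at every 11th mark, dropping the remainder.
import Mathlib
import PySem

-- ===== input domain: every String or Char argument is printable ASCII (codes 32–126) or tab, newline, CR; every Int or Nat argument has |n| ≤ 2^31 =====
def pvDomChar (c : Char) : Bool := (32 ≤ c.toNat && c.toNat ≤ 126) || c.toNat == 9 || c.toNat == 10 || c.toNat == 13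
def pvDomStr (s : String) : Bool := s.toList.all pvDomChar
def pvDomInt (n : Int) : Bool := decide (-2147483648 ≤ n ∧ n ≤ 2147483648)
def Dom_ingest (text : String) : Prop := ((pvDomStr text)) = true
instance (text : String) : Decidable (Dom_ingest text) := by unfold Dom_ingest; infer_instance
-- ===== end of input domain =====

-- B replaces A's per-char counter/accumulator loop by an index of the sentence-ending
-- marks' positions built once, then cuts the text by slicing at every 11th mark (simpler).

-- ===== PORT A =====
-- the loop body: block += c; counter bump on '.'/'!'/'?'; flush when counter > 10
def ingestStep (st : Nat × List Char × List (List Char)) (c : Char) :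
    Nat × List Char × List (List Char) :=
  let block := st.2.1 ++ [c]
  let counter := if c = '.' ∨ c = '!' ∨ c = '?' then st.1 + 1 else st.1
  if counter > 10 then (0, ([] : List Char), st.2.2 ++ [block]) else (counter, block, st.2.2)

def ingest (text : String) : List String :=
  ((text.toList.foldl ingestStep (0, [], [])).2.2).map (fun b => String.ofList b)

-- ===== PORT B =====
-- port of the comprehension [i for i, c in enumerate(text) if c in ".!?"]
def punctIdx : List Char → Nat → List Nat
  | [], _ => []
  | c :: cs, i => if c ∈ ['.', '!', '?'] then i :: punctIdx cs (i + 1) else punctIdx cs (i + 1)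

-- the while loop; the slice text[start:p+1] is ported as drop/take, exact here since
-- 0 ≤ start and start ≤ p+1 (PySem.List.slice is defined as this clamped drop/take)
def ingestAltGo (cs : List Char) (start : Nat) (punct : List Nat) : List (List Char) :=
  if h : 11 ≤ punct.length then
    ((cs.drop start).take (punct[10]'(by omega) + 1 - start)) ::
      ingestAltGo cs (punct[10]'(by omega) + 1) (punct.drop 11)
  else []
termination_by punct.length
decreasing_by simp; omega

def ingest_alt (text : String) : List String :=
  (ingestAltGo text.toList 0 (punctIdx text.toList 0)).map (fun b => String.ofList b)

-- ===== PRECONDITION & SPEC =====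
def Spec_ingest (text : String) (out : List String) : Prop := out = ingest_alt text
instance (text : String) (out : List String) : Decidable (Spec_ingest text out) := by unfold Spec_ingest; infer_instance

-- ===== CLAIM (what is proved, stated in full; the proofs are below) =====
def Claim_equal_ingest : Prop := ∀ (text : String), Dom_ingest text → Spec_ingest text (ingest text)

-- ===== LEMMAS AND PROOFS =====

-- common recursive description of the block list: c puncts already seen, b the open block
def chunksAux : Nat → List Char → List Char → List (List Char)
  | _, _, [] => []
  | c, b, x :: xs =>
    if x ∈ ['.', '!', '?'] then
      if c = 10 then (b ++ [x]) :: chunksAux 0 [] xs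
      else chunksAux (c + 1) (b ++ [x]) xs
    else chunksAux c (b ++ [x]) xs

theorem foldA (cs : List Char) : ∀ (c : Nat) (b : List Char) (acc : List (List Char)),
    c ≤ 10 → (cs.foldl ingestStep (c, b, acc)).2.2 = acc ++ chunksAux c b cs := by
  induction cs with
  | nil => intro c b acc _; simp [chunksAux]
  | cons x xs ih =>
    intro c b acc hc
    by_cases hp : x = '.' ∨ x = '!' ∨ x = '?'
    · by_cases h10 : c = 10
      · subst h10
        simp [List.foldl_cons, ingestStep, hp, chunksAux, ih 0 [] _ (by omega)]
      · have : ¬ (c + 1 > 10) := by omega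
        simp [List.foldl_cons, ingestStep, hp, this, chunksAux, h10,
          ih (c + 1) (b ++ [x]) acc (by omega)]
    · have : ¬ (c > 10) := by omega
      simp [List.foldl_cons, ingestStep, hp, this, chunksAux, ih c (b ++ [x]) acc hc]

theorem punctIdx_shift (cs : List Char) : ∀ i : Nat,
    punctIdx cs i = (punctIdx cs 0).map (· + i) := by
  induction cs with
  | nil => intro i; simp [punctIdx]
  | cons x xs ih =>
    intro i
    by_cases hp : x ∈ ['.', '!', '?']
    · simp only [punctIdx, if_pos hp, ih (i + 1), ih 1, List.map_map, List.map_cons]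
      refine congrArg₂ _ (by omega) ?_
      exact List.map_congr_left (fun a _ => by simp; omega)
    · simp only [punctIdx, if_neg hp, ih (i + 1), ih 1, List.map_map]
      exact List.map_congr_left (fun a _ => by simp; omega)

theorem chunks_none (cs : List Char) : ∀ (c : Nat) (b : List Char),
    c ≤ 10 → (punctIdx cs 0)[10 - c]? = none → chunksAux c b cs = [] := by
  induction cs with
  | nil => intro c b _ _; simp [chunksAux]
  | cons x xs ih =>
    intro c b hc hn
    by_cases hp : x ∈ ['.', '!', '?']
    · rw [punctIdx, if_pos hp, punctIdx_shift xs 1] at hn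
      by_cases h10 : c = 10
      · subst h10; simp at hn
      · have hi : 10 - c = (10 - (c + 1)) + 1 := by omega
        rw [hi, List.getElem?_cons_succ, List.getElem?_map] at hn
        simp only [Option.map_eq_none_iff] at hn
        simp [chunksAux, hp, h10, ih (c + 1) (b ++ [x]) (by omega) hn]
    · rw [punctIdx, if_neg hp, punctIdx_shift xs 1, List.getElem?_map] at hn
      simp only [Option.map_eq_none_iff] at hn
      simp [chunksAux, hp, ih c (b ++ [x]) hc hn]

theorem chunks_some (cs : List Char) : ∀ (c : Nat) (b : List Char) (p : Nat),
    c ≤ 10 → (punctIdx cs 0)[10 - c]? = some p →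
    chunksAux c b cs = (b ++ cs.take (p + 1)) :: chunksAux 0 [] (cs.drop (p + 1)) := by
  induction cs with
  | nil => intro c b p _ h; simp [punctIdx] at h
  | cons x xs ih =>
    intro c b p hc hs
    by_cases hp : x ∈ ['.', '!', '?']
    · rw [punctIdx, if_pos hp, punctIdx_shift xs 1] at hs
      by_cases h10 : c = 10
      · subst h10
        simp at hs
        subst hs
        simp [chunksAux, hp]
      · have hi : 10 - c = (10 - (c + 1)) + 1 := by omega
        rw [hi, List.getElem?_cons_succ, List.getElem?_map] at hs
        obtain ⟨q, hq, rfl⟩ := Option.map_eq_some_iff.mp hs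
        have := ih (c + 1) (b ++ [x]) q (by omega) hq
        simp [chunksAux, hp, h10, this, List.take_succ_cons, List.drop_succ_cons]
    · rw [punctIdx, if_neg hp, punctIdx_shift xs 1, List.getElem?_map] at hs
      obtain ⟨q, hq, rfl⟩ := Option.map_eq_some_iff.mp hs
      have := ih c (b ++ [x]) q hc hq
      simp [chunksAux, hp, this, List.take_succ_cons, List.drop_succ_cons]

theorem punct_drop (cs : List Char) : ∀ (k q : Nat),
    (punctIdx cs 0)[k]? = some q →
    (punctIdx cs 0).drop (k + 1) = (punctIdx (cs.drop (q + 1)) 0).map (· + (q + 1)) := by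
  induction cs with
  | nil => intro k q h; simp [punctIdx] at h
  | cons x xs ih =>
    intro k q h
    by_cases hp : x ∈ ['.', '!', '?']
    · rw [punctIdx, if_pos hp, punctIdx_shift xs 1] at h ⊢
      match k with
      | 0 =>
        simp at h
        subst h
        simp
      | k + 1 =>
        rw [List.getElem?_cons_succ, List.getElem?_map] at h
        obtain ⟨q', hq', rfl⟩ := Option.map_eq_some_iff.mp h
        rw [List.drop_succ_cons, ← List.map_drop, ih k q' hq', List.map_map]
        simp only [List.drop_succ_cons]
        exact List.map_congr_left (fun a _ => by simp [Function.comp]; omega)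
    · rw [punctIdx, if_neg hp, punctIdx_shift xs 1] at h ⊢
      rw [List.getElem?_map] at h
      obtain ⟨q', hq', rfl⟩ := Option.map_eq_some_iff.mp h
      rw [← List.map_drop, ih k q' hq', List.map_map]
      simp only [List.drop_succ_cons]
      exact List.map_congr_left (fun a _ => by simp [Function.comp]; omega)

theorem goEq (cs : List Char) (start : Nat) (punct : List Nat) :
    punct = (punctIdx (cs.drop start) 0).map (· + start) →
    ingestAltGo cs start punct = chunksAux 0 [] (cs.drop start) := by
  induction start, punct using ingestAltGo.induct with
  | case1 start punct h ih =>
    intro hpunct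
    subst hpunct
    simp only [List.getElem_map] at ih ⊢
    have hlen : 11 ≤ (punctIdx (cs.drop start) 0).length := by simpa using h
    have hq : (punctIdx (cs.drop start) 0)[10]? =
        some ((punctIdx (cs.drop start) 0)[10]'(by omega)) :=
      List.getElem?_eq_getElem (by omega)
    have h2 : cs.drop ((punctIdx (cs.drop start) 0)[10]'(by omega) + start + 1) =
        (cs.drop start).drop ((punctIdx (cs.drop start) 0)[10]'(by omega) + 1) := by
      rw [List.drop_drop]; congr 1; omega
    have hrec : (List.map (· + start) (punctIdx (cs.drop start) 0)).drop 11 =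
        List.map (· + ((punctIdx (cs.drop start) 0)[10]'(by omega) + start + 1))
          (punctIdx (cs.drop ((punctIdx (cs.drop start) 0)[10]'(by omega) + start + 1)) 0) := by
      rw [← List.map_drop, show (11 : Nat) = 10 + 1 from rfl, punct_drop _ 10 _ hq, h2,
        List.map_map]
      exact List.map_congr_left (fun a _ => by simp; omega)
    rw [ingestAltGo, dif_pos h]
    simp only [List.getElem_map]
    rw [ih hrec]
    rw [chunks_some (cs.drop start) 0 []
      ((punctIdx (cs.drop start) 0)[10]'(by omega)) (by omega) (by simp [hq])]
    rw [h2]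
    have h1 : (punctIdx (cs.drop start) 0)[10]'(by omega) + start + 1 - start =
        (punctIdx (cs.drop start) 0)[10]'(by omega) + 1 := by omega
    rw [h1]
    simp
  | case2 start punct h =>
    intro hpunct
    rw [ingestAltGo, dif_neg h]
    have hn : (punctIdx (cs.drop start) 0)[10 - 0]? = none := by
      apply List.getElem?_eq_none
      have := congrArg List.length hpunct; simp at this; omega
    rw [chunks_none (cs.drop start) 0 [] (by omega) hn]

-- ===== VERDICT (by name: the statement is the Claim_ definition above) =====
theorem ingest_spec : Claim_equal_ingest := by
  intro text _
  unfold Spec_ingest ingest ingest_alt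
  rw [foldA text.toList 0 [] [] (by omega), List.nil_append]
  rw [goEq text.toList 0 (punctIdx text.toList 0) (by simp)]
  simp
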